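-- pv_equiv track=rewrite | github.com/DevMatrix1/dsa-practice | python/vedant_bhatnagar/DevsnestProblems_THA/Phase 1/PalindromicStaircase.py | solve
-- ===== SOURCE A (Python) =====
-- def solve(n):
--     str1, str2, list1 = "", "", []
--     for i in range(1, n+1):
--         for j in range(1, i+1):
--             str1 = str1 + str(j)
--         for k in range(j-1, 0, -1):
--             str1 = str1 + str(k)
--         list1.append(str1)
--         str1 = ""
--     return list1
-- ===== SOURCE B (Python) =====
-- def solve(n):
--     parts = []   # stringified numbers 1..i, carried across rows
--     rows = []
--     for i in range(1, n + 1):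
--         parts.append(str(i))
--         rows.append(''.join(parts) + ''.join(reversed(parts[:-1])))
--     return rows
-- ===== Notes on version B (the rewrite author's own statement) =====
-- stated objective: faster
-- what changed: B carries the stringified ascending run 1..i across outer iterations in a list and forms each row by joining it and the reversed prefix of its first i-1 tokens, instead of regenerating both halves of every row with counting-up and counting-down loops that grow a string by repeated += concatenation.
import Mathlib
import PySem

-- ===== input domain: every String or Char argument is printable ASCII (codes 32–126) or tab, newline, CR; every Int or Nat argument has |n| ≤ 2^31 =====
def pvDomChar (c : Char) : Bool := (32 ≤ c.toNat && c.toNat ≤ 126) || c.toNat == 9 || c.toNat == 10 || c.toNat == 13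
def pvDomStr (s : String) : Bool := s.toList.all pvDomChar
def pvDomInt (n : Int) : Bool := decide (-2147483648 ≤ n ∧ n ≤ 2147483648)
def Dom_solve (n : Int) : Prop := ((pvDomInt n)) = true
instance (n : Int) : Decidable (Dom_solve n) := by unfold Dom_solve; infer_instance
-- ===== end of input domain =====

-- B builds each palindromic row by keeping the stringified ascending run 1..i across iterations
-- and mirroring it via join, instead of re-generating both halves with counting loops of += concatenation (objective: faster, constant factor).

-- ===== PORT A =====
-- one outer iteration of A: the ascending loop (carrying the loop variable j, 0 before first use,
-- never read uninitialised since the ascending range is nonempty for every i the outer loop yields),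
-- the descending loop, append the row, reset str1
def solveStep (st : String × Int × List String) (i : Int) : String × Int × List String :=
  let p := (PySem.List.pyRange 1 (i+1) 1).foldl
    (fun (q : String × Int) j => (q.1 ++ PySem.Int.toStr j, j)) (st.1, st.2.1)
  let s1 := (PySem.List.pyRange (p.2 - 1) 0 (-1)).foldl
    (fun s k => s ++ PySem.Int.toStr k) p.1
  ("", p.2, st.2.2 ++ [s1])

def solve (n : Int) : List String :=
  ((PySem.List.pyRange 1 (n+1) 1).foldl solveStep ("", 0, [])).2.2

-- ===== PORT B =====
-- one iteration of B: extend the carried prefix `parts`, row = join(parts) + join(reversed(parts[:-1]))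
def solveAltStep (st : List String × List String) (i : Int) : List String × List String :=
  let parts := st.1 ++ [PySem.Int.toStr i]
  (parts, st.2 ++ [PySem.Str.join "" parts ++ PySem.Str.join "" parts.dropLast.reverse])

def solve_alt (n : Int) : List String :=
  ((PySem.List.pyRange 1 (n+1) 1).foldl solveAltStep ([], [])).2

-- ===== PRECONDITION & SPEC =====
def Spec_solve (n : Int) (out : List String) : Prop := out = solve_alt n
instance (n : Int) (out : List String) : Decidable (Spec_solve n out) := by unfold Spec_solve; infer_instance

-- ===== CLAIM (what is proved, stated in full; the proofs are below) =====
def Claim_equal_solve : Prop := ∀ (n : Int), Dom_solve n → Spec_solve n (solve n)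

-- ===== LEMMAS AND PROOFS =====

-- concatenation of the decimal strings of a list of integers
def concatStr (l : List Int) : String := (l.map PySem.Int.toStr).foldr (· ++ ·) ""

-- the common row value for index i
def rowFun (i : Int) : String :=
  concatStr (PySem.List.pyRange 1 (i+1) 1) ++ concatStr (PySem.List.pyRange (i-1) 0 (-1))

theorem concatStr_nil : concatStr [] = "" := rfl

theorem concatStr_cons (x : Int) (l : List Int) :
    concatStr (x :: l) = PySem.Int.toStr x ++ concatStr l := rfl

theorem descFold (l : List Int) (s0 : String) :
    l.foldl (fun s k => s ++ PySem.Int.toStr k) s0 = s0 ++ concatStr l := by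
  induction l generalizing s0 with
  | nil => simp [concatStr_nil]
  | cons x xs ih => simp [List.foldl_cons, ih, concatStr_cons, String.append_assoc]

theorem ascFold (l : List Int) (q : String × Int) :
    l.foldl (fun (q : String × Int) j => (q.1 ++ PySem.Int.toStr j, j)) q
      = (q.1 ++ concatStr l, l.getLast?.getD q.2) := by
  induction l generalizing q with
  | nil => simp [concatStr_nil]
  | cons x xs ih =>
    simp only [List.foldl_cons, ih, concatStr_cons, String.append_assoc]
    cases xs with
    | nil => simp
    | cons y ys =>
      cases hv : (y :: ys).getLast? with
      | none => simp at hv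
      | some v => simp [hv]

theorem flatten_intersperse_nil {α : Type} (l : List (List α)) :
    (List.intersperse ([] : List α) l).flatten = l.flatten := by
  induction l with
  | nil => rfl
  | cons a l ih =>
    cases l with
    | nil => rfl
    | cons b t => simp_all [List.intersperse]

theorem join_map_toStr (l : List Int) :
    PySem.Str.join "" (l.map PySem.Int.toStr) = concatStr l := by
  induction l with
  | nil => rfl
  | cons x xs ih =>
    rw [concatStr_cons, ← ih]
    apply String.ext
    simp [PySem.Str.join, PySem.Chars.join, List.intercalate, flatten_intersperse_nil]

-- one step of A from a flushed state equals appending rowFun i (for 1 ≤ i)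
theorem solveStep_eq (j0 : Int) (L : List String) (i : Int) (hi : 1 ≤ i) :
    solveStep ("", j0, L) i = ("", i, L ++ [rowFun i]) := by
  have hne : PySem.List.pyRange 1 (i+1) 1 = PySem.List.pyRange 1 i 1 ++ [i] := by
    exact PySem.List.pyRange_one_succ_right hi
  simp only [solveStep, ascFold, descFold, hne, List.getLast?_concat]
  simp [rowFun, hne]

-- one step of B with parts = the stringified range 1..(i-1) equals appending rowFun i
theorem solveAltStep_eq (L : List String) (i : Int) (hi : 1 ≤ i) :
    solveAltStep ((PySem.List.pyRange 1 i 1).map PySem.Int.toStr, L) i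
      = ((PySem.List.pyRange 1 (i+1) 1).map PySem.Int.toStr, L ++ [rowFun i]) := by
  have hne : PySem.List.pyRange 1 (i+1) 1 = PySem.List.pyRange 1 i 1 ++ [i] :=
    PySem.List.pyRange_one_succ_right hi
  have hrev : PySem.List.pyRange (i-1) 0 (-1) = (PySem.List.pyRange 1 i 1).reverse := by
    have h := PySem.List.pyRange_neg_one_eq_reverse (i-1) 0
    simpa using h
  have hmap : (PySem.List.pyRange 1 (i+1) 1).map PySem.Int.toStr
      = (PySem.List.pyRange 1 i 1).map PySem.Int.toStr ++ [PySem.Int.toStr i] := by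
    rw [hne]; simp
  have hrow : rowFun i
      = PySem.Str.join "" ((PySem.List.pyRange 1 (i+1) 1).map PySem.Int.toStr)
        ++ PySem.Str.join "" (((PySem.List.pyRange 1 (i+1) 1).map PySem.Int.toStr).dropLast.reverse) := by
    unfold rowFun
    rw [join_map_toStr, hmap, List.dropLast_concat, ← List.map_reverse, join_map_toStr, hrev]
  simp only [solveAltStep]
  rw [← hmap, ← hrow]

def jval (m : Nat) : Int := if m = 0 then 0 else m

theorem inv (m : Nat) :
    ((PySem.List.pyRange 1 (1+(m:Int)) 1).foldl solveStep ("", 0, []))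
        = ("", jval m, ((PySem.List.pyRange 1 (1+(m:Int)) 1).map rowFun))
    ∧ ((PySem.List.pyRange 1 (1+(m:Int)) 1).foldl solveAltStep ([], []))
        = ((PySem.List.pyRange 1 (1+(m:Int)) 1).map PySem.Int.toStr,
           (PySem.List.pyRange 1 (1+(m:Int)) 1).map rowFun) := by
  induction m with
  | zero => simp [PySem.List.pyRange_one_eq_nil, jval]
  | succ k ih =>
    have hsplit : PySem.List.pyRange 1 (1+((k+1:Nat):Int)) 1
        = PySem.List.pyRange 1 (1+(k:Int)) 1 ++ [1+(k:Int)] := by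
      have h := PySem.List.pyRange_one_succ_right (a := 1) (b := 1+(k:Int)) (by omega)
      push_cast
      push_cast at h
      convert h using 2
    have hk1 : (1:Int) ≤ 1+(k:Int) := by omega
    constructor
    · rw [hsplit, List.foldl_append, List.map_append, ih.1]
      simp only [List.foldl_cons, List.foldl_nil, solveStep_eq _ _ _ hk1]
      simp [jval]
      omega
    · rw [hsplit, List.foldl_append, List.map_append, List.map_append, ih.2]
      simp only [List.foldl_cons, List.foldl_nil, solveAltStep_eq _ _ hk1]
      rw [PySem.List.pyRange_one_succ_right hk1]
      simp

-- ===== VERDICT (by name: the statement is the Claim_ definition above) =====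
theorem solve_spec : Claim_equal_solve := by
  intro n _
  unfold Spec_solve solve solve_alt
  by_cases h : n ≤ 0
  · rw [PySem.List.pyRange_one_eq_nil (by omega : n+1 ≤ 1)]
    rfl
  · have hm : n + 1 = 1 + ((n.toNat : Nat) : Int) := by omega
    rw [hm, (inv n.toNat).1, (inv n.toNat).2]
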